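-- pv_equiv track=rewrite | github.com/wandszera/cut-saas | app/services/subtitles.py | _wrap_text_ass
-- ===== SOURCE A (Python) =====
-- def _wrap_text_ass(text: str, max_words_per_line: int) -> str:
--     words = text.split()
--     if not words:
--         return ""
--
--     lines = []
--     current = []
--
--     for word in words:
--         current.append(word)
--         if len(current) >= max_words_per_line:
--             lines.append(" ".join(current))
--             current = []
--
--     if current:
--         lines.append(" ".join(current))
--
--     return r"\N".join(lines)
-- ===== SOURCE B (Python) =====
-- def _wrap_text_ass(text: str, max_words_per_line: int) -> str:
--     words = text.split()
--     if not words: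
--         return ""
--     step = max_words_per_line if max_words_per_line >= 1 else 1
--     lines = [" ".join(words[i:i + step]) for i in range(0, len(words), step)]
--     return r"\N".join(lines)
-- ===== Notes on version B (the rewrite author's own statement) =====
-- stated objective: alternative
-- what changed: Replaces the per-word accumulate-and-flush loop over a mutable 'current' buffer with index-based chunking: a single strided range over the word list and slice-joins, with the stride clamped to 1 so max_words_per_line <= 0 still yields one word per line.
import Mathlib
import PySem

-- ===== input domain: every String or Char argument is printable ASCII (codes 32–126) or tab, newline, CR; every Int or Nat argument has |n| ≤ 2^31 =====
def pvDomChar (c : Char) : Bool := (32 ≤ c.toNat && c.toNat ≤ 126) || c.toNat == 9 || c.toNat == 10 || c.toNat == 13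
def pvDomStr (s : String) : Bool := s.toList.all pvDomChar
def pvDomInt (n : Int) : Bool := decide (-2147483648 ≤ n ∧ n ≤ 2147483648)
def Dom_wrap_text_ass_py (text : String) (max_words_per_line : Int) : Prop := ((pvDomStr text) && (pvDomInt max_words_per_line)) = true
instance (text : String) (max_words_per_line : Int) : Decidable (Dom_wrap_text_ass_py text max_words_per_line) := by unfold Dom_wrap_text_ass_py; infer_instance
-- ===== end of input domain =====

-- B wraps by strided index chunking over the split word list (clamping the stride to ≥ 1)
-- instead of A's accumulate-and-flush word loop; same output, alternative decomposition.

-- ===== PORT A =====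
-- loop body of A's for-loop (append word; flush when the buffer reaches max_words_per_line)
def stepA (m : Int) (st : List String × List String) (word : String) : List String × List String :=
  let current := st.2 ++ [word]
  if (current.length : Int) ≥ m then (st.1 ++ [PySem.Str.join " " current], [])
  else (st.1, current)

def wrap_text_ass_py (text : String) (max_words_per_line : Int) : String :=
  let words := PySem.Str.split₀ text
  if words = [] then ""
  else
    let st := words.foldl (stepA max_words_per_line) ([], [])
    let lines := if st.2 ≠ [] then st.1 ++ [PySem.Str.join " " st.2] else st.1
    PySem.Str.join "\\N" lines

-- ===== PORT B =====
def wrap_text_ass_py_alt (text : String) (max_words_per_line : Int) : String :=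
  let words := PySem.Str.split₀ text
  if words = [] then ""
  else
    let step : Int := if max_words_per_line ≥ 1 then max_words_per_line else 1
    let lines := (PySem.List.pyRange 0 (words.length : Int) step).map
      (fun i => PySem.Str.join " " (PySem.List.slice words (some i) (some (i + step))))
    PySem.Str.join "\\N" lines

-- ===== PRECONDITION & SPEC =====
def Spec_wrap_text_ass_py (text : String) (max_words_per_line : Int) (out : String) : Prop := out = wrap_text_ass_py_alt text max_words_per_line
instance (text : String) (max_words_per_line : Int) (out : String) : Decidable (Spec_wrap_text_ass_py text max_words_per_line out) := by unfold Spec_wrap_text_ass_py; infer_instance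

-- ===== CLAIM (what is proved, stated in full; the proofs are below) =====
def Claim_equal_wrap_text_ass_py : Prop := ∀ (text : String) (max_words_per_line : Int), Dom_wrap_text_ass_py text max_words_per_line → Spec_wrap_text_ass_py text max_words_per_line (wrap_text_ass_py text max_words_per_line)

-- ===== LEMMAS AND PROOFS =====

-- the chunks of a word list, each of size s+1 (the last possibly shorter)
def chunksN (s : Nat) : List String → List (List String)
  | [] => []
  | w :: ws => (w :: ws.take s) :: chunksN s (ws.drop s)
termination_by ws => ws.length
decreasing_by simp

lemma chunksN_nil (s : Nat) : chunksN s [] = [] := by rw [chunksN]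

lemma chunksN_cons (s : Nat) (w : String) (ws : List String) :
    chunksN s (w :: ws) = (w :: ws.take s) :: chunksN s (ws.drop s) := by rw [chunksN]

-- A's loop from a partially filled buffer: the next flush happens after k more words
lemma fold_fill (m : Int) (s : Nat) (hm : (if 1 ≤ m then m else 1) = (s : Int) + 1) :
    ∀ (ws : List String) (k : Nat) (lines current : List String),
      0 < k → current.length + k = s + 1 →
      List.foldl (stepA m) (lines, current) ws =
        if ws.length < k then (lines, current ++ ws)
        else List.foldl (stepA m) (lines ++ [PySem.Str.join " " (current ++ ws.take k)], []) (ws.drop k) := by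
  intro ws
  induction ws with
  | nil =>
    intro k lines current hk _
    simp [hk]
  | cons w tl ih =>
    intro k lines current hk hlen
    match k, hk with
    | 1, _ =>
      have hfire : ((current ++ [w]).length : Int) ≥ m := by
        by_cases h : 1 ≤ m
        · rw [if_pos h] at hm; simp; omega
        · simp; omega
      simp only [List.foldl_cons, stepA, hfire, if_pos]
      simp
    | (j+2), _ =>
      have hs0 : ¬ ((current ++ [w]).length : Int) ≥ m := by
        by_cases h : 1 ≤ m
        · rw [if_pos h] at hm; simp; omega
        · rw [if_neg h] at hm; omega
      simp only [List.foldl_cons, stepA, ge_iff_le]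
      rw [if_neg hs0]
      rw [ih (j+1) lines (current ++ [w]) (by omega) (by simp; omega)]
      have hcond : (tl.length < j + 1) = ((w :: tl).length < j + 2) := by simp
      by_cases hc : tl.length < j + 1
      · rw [if_pos hc, if_pos (by simp; omega)]
        simp
      · rw [if_neg hc, if_neg (by simp; omega)]
        simp [List.take_succ_cons, List.drop_succ_cons, List.append_assoc]

-- A's whole loop plus the trailing flush computes the joined chunks
lemma fold_chunks (m : Int) (s : Nat) (hm : (if 1 ≤ m then m else 1) = (s : Int) + 1) :
    ∀ (n : Nat) (ws : List String) (lines : List String), ws.length ≤ n →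
      (let st := List.foldl (stepA m) (lines, []) ws
       if st.2 ≠ [] then st.1 ++ [PySem.Str.join " " st.2] else st.1)
      = lines ++ (chunksN s ws).map (PySem.Str.join " ") := by
  intro n
  induction n with
  | zero =>
    intro ws lines hlen
    have : ws = [] := by cases ws <;> simp_all
    subst this
    simp [chunksN_nil]
  | succ n ih =>
    intro ws lines hlen
    cases ws with
    | nil => simp [chunksN_nil]
    | cons w tl =>
      rw [fold_fill m s hm (w :: tl) (s+1) lines [] (by omega) (by simp)]
      by_cases hc : (w :: tl).length < s + 1
      · rw [if_pos hc]
        have htl : tl.length ≤ s := by simp at hc; omega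
        have h1 : tl.take s = tl := List.take_of_length_le htl
        have h2 : tl.drop s = [] := List.drop_of_length_le htl
        simp [chunksN_cons, chunksN_nil, h1, h2]
      · rw [if_neg hc]
        have hdrop : ((w :: tl).drop (s+1)).length ≤ n := by
          simp only [List.length_cons] at hlen
          simp only [List.drop_succ_cons, List.length_drop]
          omega
        rw [ih ((w :: tl).drop (s+1)) _ hdrop]
        simp [chunksN_cons, List.append_assoc]

-- the Nat core of B: the strided-index slices are exactly the chunks
lemma chunksN_eq_range (s : Nat) :
    ∀ (n : Nat) (ws : List String), ws.length ≤ n →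
      (List.range ((ws.length + s) / (s+1))).map (fun k => (ws.drop ((s+1)*k)).take (s+1))
        = chunksN s ws := by
  intro n
  induction n with
  | zero =>
    intro ws hlen
    have : ws = [] := by cases ws <;> simp_all
    subst this
    have h0 : (0 + s) / (s+1) = 0 := Nat.div_eq_of_lt (by omega)
    simp only [List.length_nil, h0, List.range_zero, List.map_nil, chunksN_nil]
  | succ n ih =>
    intro ws hlen
    cases ws with
    | nil =>
      have h0 : (0 + s) / (s+1) = 0 := Nat.div_eq_of_lt (by omega)
      simp only [List.length_nil, h0, List.range_zero, List.map_nil, chunksN_nil]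
    | cons w tl =>
      have hN : ((w :: tl).length + s) / (s+1) = tl.length / (s+1) + 1 := by
        have : (w :: tl).length + s = tl.length + (s+1) := by simp; omega
        rw [this, Nat.add_div_right _ (Nat.succ_pos s)]
      have hlen' : tl.length / (s+1) = ((tl.drop s).length + s) / (s+1) := by
        have hd : (tl.drop s).length = tl.length - s := by simp
        rw [hd]
        by_cases hst : s ≤ tl.length
        · congr 1
          omega
        · rw [Nat.div_eq_of_lt (by omega), Nat.div_eq_of_lt (by omega)]
      rw [hN, List.range_succ_eq_map, List.map_cons, List.map_map]
      have hhead : ((w :: tl).drop ((s+1)*0)).take (s+1) = w :: tl.take s := by simp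
      rw [hhead]
      have hrec : ((List.range (tl.length / (s+1))).map
            ((fun k => ((w :: tl).drop ((s+1)*k)).take (s+1)) ∘ Nat.succ))
          = chunksN s (tl.drop s) := by
        rw [← ih (tl.drop s) (by have := hlen; simp at this ⊢; omega), ← hlen']
        apply List.map_congr_left
        intro k _
        simp only [Function.comp]
        have h1 : (s+1) * (Nat.succ k) = (s+1) + (s+1)*k := by rw [Nat.succ_eq_add_one]; ring
        rw [h1, ← List.drop_drop]
        simp [List.drop_drop]
      rw [hrec]
      simp [chunksN_cons]

-- B's strided pyRange/slice map equals the joined chunks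
lemma map_join_slice (s : Nat) (ws : List String) :
    (PySem.List.pyRange 0 (ws.length : Int) ((s : Int) + 1)).map
        (fun i => PySem.Str.join " " (PySem.List.slice ws (some i) (some (i + ((s : Int) + 1)))))
      = (chunksN s ws).map (PySem.Str.join " ") := by
  rw [PySem.List.pyRange_of_pos 0 (ws.length : Int) (by positivity)]
  cases hws : ws with
  | nil => simp [chunksN_nil]
  | cons w tl =>
    rw [← hws]
    have hlt : (0 : Int) < (ws.length : Int) := by subst hws; simp
    rw [if_pos hlt]
    have hcount : (((ws.length : Int) - 0 + ((s:Int)+1) - 1) / ((s:Int)+1)).toNat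
        = (ws.length + s) / (s+1) := by
      have h1 : ((ws.length : Int) - 0 + ((s:Int)+1) - 1) = ((ws.length + s : Nat) : Int) := by
        push_cast; ring
      have h2 : ((s:Int)+1) = (((s+1 : Nat)) : Int) := by push_cast; ring
      rw [h1, h2, ← Int.natCast_ediv, Int.toNat_natCast]
    rw [hcount, List.map_map]
    rw [← chunksN_eq_range s ws.length ws (le_refl _), List.map_map]
    apply List.map_congr_left
    intro k _
    simp only [Function.comp]
    have h1 : (0 : Int) + ((s:Int)+1) * (k : Int) = (((s+1)*k : Nat) : Int) := by push_cast; ring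
    have h2 : (((s+1)*k : Nat) : Int) + ((s:Int)+1) = (((s+1)*k : Nat) : Int) + ((s+1 : Nat) : Int) := by
      push_cast; ring
    rw [h1, h2, PySem.List.slice_natCast_add]

-- ===== VERDICT (by name: the statement is the Claim_ definition above) =====
theorem wrap_text_ass_py_spec : Claim_equal_wrap_text_ass_py := by
  intro text m _
  unfold Spec_wrap_text_ass_py wrap_text_ass_py wrap_text_ass_py_alt
  simp only []
  by_cases hw : PySem.Str.split₀ text = []
  · simp [hw]
  · rw [if_neg hw, if_neg hw]
    set s : Nat := (if 1 ≤ m then m else 1).toNat - 1 with hs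
    have hm : (if 1 ≤ m then m else 1) = (s : Int) + 1 := by
      rw [hs]; split_ifs <;> omega
    have hstep : (if m ≥ 1 then m else 1) = (s : Int) + 1 := hm
    rw [hstep]
    rw [map_join_slice s (PySem.Str.split₀ text)]
    have hfc := fold_chunks m s hm (PySem.Str.split₀ text).length (PySem.Str.split₀ text) [] (le_refl _)
    simp only [List.nil_append] at hfc
    rw [← hfc]
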